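-- pv_equiv track=rewrite | github.com/power721/atv-player | src/atv_player/player/m3u8_ad_filter.py | _remove_redundant_discontinuities
-- ===== SOURCE A (Python) =====
-- def _is_media_uri(line: str) -> bool:
--     return bool(line) and not line.startswith("#")
--
-- def _remove_redundant_discontinuities(lines: list[str]) -> tuple[list[str], bool]:
--     changed = False
--     cleaned: list[str] = []
--     for index, line in enumerate(lines):
--         if line != "#EXT-X-DISCONTINUITY":
--             cleaned.append(line)
--             continue
--         previous_line = cleaned[-1] if cleaned else ""
--         media_ahead = any(_is_media_uri(candidate) for candidate in lines[index + 1 :])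
--         if _is_media_uri(previous_line) and media_ahead:
--             cleaned.append(line)
--             continue
--         changed = True
--     return cleaned, changed
-- ===== SOURCE B (Python) =====
-- def _is_media_uri(line: str) -> bool:
--     return bool(line) and not line.startswith("#")
--
-- def _remove_redundant_discontinuities(lines: list[str]) -> tuple[list[str], bool]:
--     # Backward pass: ahead[i] == "some media URI occurs after index i".
--     n = len(lines)
--     ahead = [False] * n
--     seen = False
--     for i in range(n - 1, -1, -1):
--         ahead[i] = seen
--         if _is_media_uri(lines[i]):
--             seen = True
--     # One forward pass; track the last kept line instead of indexing cleaned[-1].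
--     cleaned: list[str] = []
--     changed = False
--     prev = ""
--     for line, media_ahead in zip(lines, ahead):
--         if line != "#EXT-X-DISCONTINUITY":
--             cleaned.append(line)
--             prev = line
--         elif _is_media_uri(prev) and media_ahead:
--             cleaned.append(line)
--             prev = line
--         else:
--             changed = True
--     return cleaned, changed
-- ===== Notes on version B (the rewrite author's own statement) =====
-- stated objective: alternative
-- what changed: Replaced the per-discontinuity rescan of the whole remaining list (any() over lines[index+1:]) by a single backward pass precomputing a suffix media-ahead flag, and the cleaned[-1] lookup by a tracked last-kept line; this removes A's worst-case quadratic rescans but was not measurably faster on the generated inputs.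
import Mathlib
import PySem

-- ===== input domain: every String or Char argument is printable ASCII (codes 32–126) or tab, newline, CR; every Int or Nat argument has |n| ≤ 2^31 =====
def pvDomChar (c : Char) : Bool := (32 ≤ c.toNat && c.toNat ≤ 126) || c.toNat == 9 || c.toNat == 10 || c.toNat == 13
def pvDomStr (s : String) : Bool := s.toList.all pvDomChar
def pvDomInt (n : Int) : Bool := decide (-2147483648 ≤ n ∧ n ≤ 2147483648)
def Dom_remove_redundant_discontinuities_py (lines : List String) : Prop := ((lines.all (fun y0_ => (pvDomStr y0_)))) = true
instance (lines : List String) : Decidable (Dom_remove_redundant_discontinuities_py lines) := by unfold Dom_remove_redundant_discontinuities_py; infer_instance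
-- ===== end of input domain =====

-- B replaces A's per-discontinuity rescan of lines[index+1:] by one precomputed backward
-- suffix pass and tracks the last kept line instead of reading cleaned[-1] (objective: alternative).

-- ===== PORT A =====
-- helper _is_media_uri: bool(line) and not line.startswith("#")
def pvIsMedia (line : String) : Bool :=
  decide (line ≠ "") && !(PySem.Str.startswith line "#")

-- the for-loop of A: `rest` is the not-yet-processed suffix lines[index:];
-- media_ahead recomputes any() over the slice lines[index+1:] of the FULL list, as A does
def pvALoop (lines : List String) : Nat → List String → List String → Bool → List String × Bool
  | _, [], cleaned, changed => (cleaned, changed)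
  | index, line :: rest, cleaned, changed =>
    if line ≠ "#EXT-X-DISCONTINUITY" then
      pvALoop lines (index + 1) rest (cleaned ++ [line]) changed
    else
      let previous_line := cleaned.getLastD ""   -- cleaned[-1] if cleaned else ""
      let media_ahead := (PySem.List.slice lines (some ((index : Int) + 1)) none).any pvIsMedia
      if pvIsMedia previous_line && media_ahead then
        pvALoop lines (index + 1) rest (cleaned ++ [line]) changed
      else
        pvALoop lines (index + 1) rest cleaned true

def remove_redundant_discontinuities_py (lines : List String) : List String × Bool :=
  pvALoop lines 0 lines [] false

-- ===== PORT B =====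
-- backward pass of Source B: returns (ahead flags for each index, seen-so-far accumulator)
def pvAheadFold (lines : List String) : List Bool × Bool :=
  lines.foldr (fun l acc => (acc.2 :: acc.1, acc.2 || pvIsMedia l)) ([], false)

-- forward pass of Source B over zip(lines, ahead), carrying cleaned, changed, prev
def pvBLoop : List (String × Bool) → List String → Bool → String → List String × Bool
  | [], cleaned, changed, _ => (cleaned, changed)
  | (line, mediaAhead) :: rest, cleaned, changed, prev =>
    if line ≠ "#EXT-X-DISCONTINUITY" then
      pvBLoop rest (cleaned ++ [line]) changed line
    else if pvIsMedia prev && mediaAhead then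
      pvBLoop rest (cleaned ++ [line]) changed line
    else
      pvBLoop rest cleaned true prev

def remove_redundant_discontinuities_py_alt (lines : List String) : List String × Bool :=
  pvBLoop (lines.zip (pvAheadFold lines).1) [] false ""

-- ===== PRECONDITION & SPEC =====
def Spec_remove_redundant_discontinuities_py (lines : List String) (out : List String × Bool) : Prop := out = remove_redundant_discontinuities_py_alt lines
instance (lines : List String) (out : List String × Bool) : Decidable (Spec_remove_redundant_discontinuities_py lines out) := by unfold Spec_remove_redundant_discontinuities_py; infer_instance

-- ===== CLAIM (what is proved, stated in full; the proofs are below) =====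
def Claim_equal_remove_redundant_discontinuities_py : Prop := ∀ (lines : List String), Dom_remove_redundant_discontinuities_py lines → Spec_remove_redundant_discontinuities_py lines (remove_redundant_discontinuities_py lines)

-- ===== LEMMAS AND PROOFS =====

theorem pvAheadFold_snd (l : List String) : (pvAheadFold l).2 = l.any pvIsMedia := by
  induction l with
  | nil => rfl
  | cons x t ih => simp [pvAheadFold, List.foldr] at ih ⊢; rw [ih, Bool.or_comm]

theorem pvAheadFold_fst_cons (x : String) (t : List String) :
    (pvAheadFold (x :: t)).1 = (pvAheadFold t).2 :: (pvAheadFold t).1 := rfl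

theorem pvLoop_eq (lines : List String) (rest : List String) :
    ∀ (index : Nat) (cleaned : List String) (changed : Bool),
      lines.drop index = rest →
      pvALoop lines index rest cleaned changed =
        pvBLoop (rest.zip (pvAheadFold rest).1) cleaned changed (cleaned.getLastD "") := by
  induction rest with
  | nil => intro index cleaned changed _; rfl
  | cons line rest ih =>
    intro index cleaned changed hdrop
    have hdrop' : lines.drop (index + 1) = rest := by
      rw [← List.drop_drop (i := 1) (j := index) (l := lines)]
      simp [hdrop]
    have hslice : PySem.List.slice lines (some ((index : Int) + 1)) none = rest := by
      have : ((index : Int) + 1) = (((index + 1 : Nat)) : Int) := by push_cast; ring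
      rw [this, PySem.List.slice_from_natCast, hdrop']
    rw [pvAheadFold_fst_cons]
    simp only [pvALoop, pvBLoop, List.zip_cons_cons, hslice, pvAheadFold_snd]
    split_ifs with h1 h2
    · rw [ih (index + 1) (cleaned ++ [line]) changed hdrop']
      simp
    · rw [ih (index + 1) (cleaned ++ [line]) changed hdrop']
      simp
    · exact ih (index + 1) cleaned true hdrop'

-- ===== VERDICT (by name: the statement is the Claim_ definition above) =====
theorem remove_redundant_discontinuities_py_spec : Claim_equal_remove_redundant_discontinuities_py := by
  intro lines _
  unfold Spec_remove_redundant_discontinuities_py remove_redundant_discontinuities_py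
    remove_redundant_discontinuities_py_alt
  exact pvLoop_eq lines lines 0 [] false rfl
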